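-- pv_equiv track=rewrite | github.com/thecozysweaters/interview-prep | searchShiftSortedArray.py | findShift
-- ===== SOURCE A (Python) =====
-- def findShift(A):
--     '''
--     Given a shift sorted array, A (e.g. [4, 5, 0, 1, 2, 3]), return the amount that the array is shifted by.
--     '''
--     i = 0
--     j = len(A) - 1
--
--     if (A[i] < A[j]): return 0
--     else:
--         min_index = 0
--         min_so_far = A[min_index]
--         for i in range(len(A)):
--             if A[i] < min_so_far:
--                 min_so_far = A[i]
--                 min_index = i
--     return min_index
-- ===== SOURCE B (Python) =====
-- def findShift(A):
--     '''
--     Given a shift sorted array, A (e.g. [4, 5, 0, 1, 2, 3]), return the amount that the array is shifted by.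
--     '''
--     if A[0] < A[-1]:
--         return 0
--
--     def first_argmin(lo, hi):
--         # index of the first minimum of A[lo:hi], by tournament recursion on halves
--         if hi - lo == 1:
--             return lo
--         mid = (lo + hi) // 2
--         l = first_argmin(lo, mid)
--         r = first_argmin(mid, hi)
--         return l if A[l] <= A[r] else r
--
--     return first_argmin(0, len(A))
-- ===== Notes on version B (the rewrite author's own statement) =====
-- stated objective: alternative
-- what changed: Replaces A's single left-to-right accumulator scan carrying (min_index, min_so_far) with a tournament-style divide-and-conquer recursion: split the index range in half, recursively take the first argmin of each half, and combine with a left-biased comparison.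
import Mathlib
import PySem

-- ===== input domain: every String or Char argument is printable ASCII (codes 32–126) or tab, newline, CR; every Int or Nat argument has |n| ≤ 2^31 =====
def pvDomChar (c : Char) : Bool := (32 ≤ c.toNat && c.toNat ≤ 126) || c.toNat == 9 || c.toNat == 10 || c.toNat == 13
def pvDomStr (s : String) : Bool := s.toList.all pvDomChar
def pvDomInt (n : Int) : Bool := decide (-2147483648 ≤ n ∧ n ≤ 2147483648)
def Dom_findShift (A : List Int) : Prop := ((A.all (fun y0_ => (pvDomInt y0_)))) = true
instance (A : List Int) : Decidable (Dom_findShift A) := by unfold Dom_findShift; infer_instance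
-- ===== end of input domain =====

-- B replaces A's accumulator scan by a tournament divide-and-conquer recursion on index halves (same cost, different decomposition).

-- ===== PORT A =====
def findShift (A : List Int) : Int :=
  let i : Int := 0
  let j : Int := (A.length : Int) - 1
  if (PySem.List.pyGet? A i).getD 0 < (PySem.List.pyGet? A j).getD 0 then 0
  else
    let st :=
      (PySem.List.pyRange 0 (A.length : Int) 1).foldl
        (fun (st : Int × Int) i =>
          let x := PySem.List.pyGetD A i 0
          if x < st.2 then (i, x) else st)
        (0, PySem.List.pyGetD A 0 0)
    st.1

-- ===== PORT B =====
-- first_argmin(lo, hi): tournament recursion on halves; lo, hi are nonnegative indices, so Nat.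
def firstArgmin (A : List Int) (lo hi : Nat) : Nat :=
  if hi ≤ lo + 1 then lo
  else
    let mid := (lo + hi) / 2
    let l := firstArgmin A lo mid
    let r := firstArgmin A mid hi
    if A.getD l 0 ≤ A.getD r 0 then l else r
termination_by hi - lo
decreasing_by all_goals omega

def findShift_alt (A : List Int) : Int :=
  if (PySem.List.pyGet? A 0).getD 0 < (PySem.List.pyGet? A (-1)).getD 0 then 0
  else (firstArgmin A 0 A.length : Int)

-- ===== PRECONDITION & SPEC =====
-- Pre_: A raises IndexError on the empty list (A[0]); B raises there too.
def Pre_findShift (A : List Int) : Prop := A ≠ []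
instance (A : List Int) : Decidable (Pre_findShift A) := by unfold Pre_findShift; infer_instance
def pvWitness_findShift : List Int := [4, 5, 0, 1, 2, 3]

def Spec_findShift (A : List Int) (out : Int) : Prop := out = findShift_alt A
instance (A : List Int) (out : Int) : Decidable (Spec_findShift A out) := by unfold Spec_findShift; infer_instance

-- ===== CLAIM (what is proved, stated in full; the proofs are below) =====
def Claim_equal_findShift : Prop := ∀ (A : List Int), Dom_findShift A → Pre_findShift A → Spec_findShift A (findShift A)

-- ===== LEMMAS AND PROOFS =====

-- "k is the index of the FIRST minimum of A[lo:hi]"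
def pvFirstMin (A : List Int) (lo hi k : Nat) : Prop :=
  lo ≤ k ∧ k < hi ∧ (∀ i, lo ≤ i → i < hi → A.getD k 0 ≤ A.getD i 0) ∧
    (∀ i, lo ≤ i → i < k → A.getD k 0 < A.getD i 0)

theorem pvFirstMin_unique {A : List Int} {lo hi k k' : Nat}
    (h : pvFirstMin A lo hi k) (h' : pvFirstMin A lo hi k') : k = k' := by
  obtain ⟨hl, hh, hmin, hfst⟩ := h
  obtain ⟨hl', hh', hmin', hfst'⟩ := h'
  by_contra hne
  rcases Nat.lt_or_ge k k' with hlt | hge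
  · have h1 := hmin k' hl' hh'
    have h2 := hfst' k hl hlt
    omega
  · have hlt : k' < k := by omega
    have h1 := hmin' k hl hh
    have h2 := hfst k' hl' hlt
    omega

theorem firstArgmin_firstMin (A : List Int) : ∀ (n lo hi : Nat), hi - lo ≤ n → lo < hi →
    pvFirstMin A lo hi (firstArgmin A lo hi) := by
  intro n
  induction n with
  | zero => intro lo hi h1 h2; omega
  | succ n ih =>
    intro lo hi h1 h2
    rw [firstArgmin]
    by_cases hle : hi ≤ lo + 1
    · rw [if_pos hle]
      refine ⟨le_refl _, h2, ?_, fun i hi1 hi2 => by omega⟩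
      intro i hi1 hi2
      have : i = lo := by omega
      simp [this]
    · rw [if_neg hle]
      simp only []
      obtain ⟨hl1, hl2, hlmin, hlfst⟩ := ih lo ((lo + hi) / 2) (by omega) (by omega)
      obtain ⟨hr1, hr2, hrmin, hrfst⟩ := ih ((lo + hi) / 2) hi (by omega) (by omega)
      by_cases hc : A.getD (firstArgmin A lo ((lo + hi) / 2)) 0 ≤
          A.getD (firstArgmin A ((lo + hi) / 2) hi) 0
      · rw [if_pos hc]
        refine ⟨hl1, by omega, ?_, ?_⟩
        · intro i h1' h2'
          by_cases hi' : i < (lo + hi) / 2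
          · exact hlmin i h1' hi'
          · exact le_trans hc (hrmin i (by omega) h2')
        · intro i h1' h2'
          exact hlfst i h1' h2'
      · rw [if_neg hc]
        refine ⟨by omega, hr2, ?_, ?_⟩
        · intro i h1' h2'
          by_cases hi' : i < (lo + hi) / 2
          · exact le_trans (le_of_lt (not_le.mp hc)) (hlmin i h1' hi')
          · exact hrmin i (by omega) h2'
        · intro i h1' h2'
          by_cases hi' : i < (lo + hi) / 2
          · exact lt_of_lt_of_le (not_le.mp hc) (hlmin i h1' hi')
          · exact hrfst i (by omega) h2'

-- the first index of the minimum value satisfies pvFirstMin over the whole list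
theorem pvIndexMin_firstMin (a : Int) (t : List Int) :
    pvFirstMin (a :: t) 0 (a :: t).length
      ((PySem.List.index? (a :: t) (t.foldl min a)).getD 0) := by
  have hmin : PySem.List.min? (a :: t) (fun y => y) = some (t.foldl min a) :=
    PySem.List.min?_id_cons a t
  have hmem : t.foldl min a ∈ a :: t := PySem.List.min?_mem hmin
  have hlb : ∀ y ∈ a :: t, t.foldl min a ≤ y := PySem.List.min?_isMin hmin
  rcases Option.isSome_iff_exists.mp
    ((PySem.List.index?_isSome_iff _ _).mpr hmem) with ⟨k, hk⟩
  obtain ⟨hklen, hkv, hkfst⟩ := PySem.List.getElem_of_index?_eq_some hk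
  rw [hk, Option.getD_some]
  refine ⟨Nat.zero_le _, hklen, ?_, ?_⟩
  · intro i _ h2
    rw [List.getD_eq_getElem _ _ hklen, List.getD_eq_getElem _ _ h2, hkv]
    exact hlb _ (List.getElem_mem h2)
  · intro i _ h2
    have hilen : i < (a :: t).length := by omega
    rw [List.getD_eq_getElem _ _ hklen, List.getD_eq_getElem _ _ hilen, hkv]
    have hne := hkfst i h2
    have := hlb _ (List.getElem_mem hilen)
    omega

-- A's loop body, uncurried on (index, value) pairs.
def pvStep (st : Int × Int) (p : Int × Int) : Int × Int :=
  if p.2 < st.2 then (p.1, p.2) else st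

-- reference recursion: A's loop as structural recursion over the (index, element) stream
def pvArgmin : List Int → Int → Int → Int → Int
  | [], _, mi, _ => mi
  | x :: t, s, mi, mv => if x < mv then pvArgmin t (s+1) s x else pvArgmin t (s+1) mi mv

theorem pvFold_eq_argmin (t : List Int) : ∀ (s mi mv : Int),
    ((PySem.List.enumerate t s).foldl pvStep (mi, mv)).1 = pvArgmin t s mi mv := by
  induction t with
  | nil => intro s mi mv; simp [pvArgmin, PySem.List.enumerate_nil]
  | cons x r ih =>
    intro s mi mv
    rw [PySem.List.enumerate_cons]
    simp only [List.foldl_cons, pvStep, pvArgmin]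
    by_cases h : x < mv <;> simp [h, ih]

theorem pvMin?_eq_some (l : List Int) (m : Int) (hm : m ∈ l)
    (hlb : ∀ y ∈ l, m ≤ y) : PySem.List.min? l (fun x => x) = some m := by
  cases hmin : PySem.List.min? l (fun x => x) with
  | none =>
    rw [PySem.List.min?_eq_none_iff] at hmin
    subst hmin; simp at hm
  | some m' =>
    have h1 := PySem.List.min?_mem hmin
    have h2 := PySem.List.min?_isMin hmin m hm
    have h3 := hlb m' h1
    exact congrArg some (le_antisymm h2 h3)

-- characterisation of A's loop: the result is mi unless some element beats mv,
-- in which case it is s plus the first index of the minimum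
theorem pvArgmin_spec (t : List Int) : ∀ (s mi mv : Int),
    pvArgmin t s mi mv =
      match PySem.List.min? (t.filter (fun y => decide (y < mv))) (fun x => x) with
      | none => mi
      | some m => s + ((PySem.List.index? t m).getD 0 : Int) := by
  induction t with
  | nil => intro s mi mv; simp [pvArgmin, PySem.List.min?]
  | cons x r ih =>
    intro s mi mv
    by_cases hx : x < mv
    · simp only [pvArgmin, if_pos hx, List.filter_cons, decide_eq_true hx, if_pos]
      rw [ih (s+1) s x]
      cases hmin : PySem.List.min? (r.filter (fun y => decide (y < x))) (fun y => y) with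
      | none =>
        rw [PySem.List.min?_eq_none_iff] at hmin
        have hge : ∀ y ∈ r.filter (fun y => decide (y < mv)), x ≤ y := by
          intro y hy
          have hmem := List.mem_of_mem_filter hy
          have hlt := List.of_mem_filter hy
          by_contra hlt2
          rw [not_le] at hlt2
          have : y ∈ r.filter (fun y => decide (y < x)) := by
            apply List.mem_filter_of_mem hmem; simpa using hlt2
          simp [hmin] at this
        have : PySem.List.min? (x :: r.filter (fun y => decide (y < mv))) (fun y => y) = some x := by
          apply pvMin?_eq_some
          · exact List.mem_cons_self
          · intro y hy
            rcases List.mem_cons.mp hy with h | h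
            · omega
            · exact hge y h
        rw [this]
        show s = s + (((PySem.List.index? (x :: r) x).getD 0 : Nat) : Int)
        rw [PySem.List.index?_cons_self]
        simp
      | some m =>
        have hmmem := List.mem_of_mem_filter (PySem.List.min?_mem hmin)
        have hmlt : m < x := by simpa using List.of_mem_filter (PySem.List.min?_mem hmin)
        have hmlb := PySem.List.min?_isMin hmin
        have : PySem.List.min? (x :: r.filter (fun y => decide (y < mv))) (fun y => y) = some m := by
          apply pvMin?_eq_some
          · exact List.mem_cons_of_mem _ (List.mem_filter_of_mem hmmem (by simpa using (by omega : m < mv)))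
          · intro y hy
            rcases List.mem_cons.mp hy with h | h
            · omega
            · by_cases hyx : y < x
              · exact hmlb y (List.mem_filter_of_mem (List.mem_of_mem_filter h) (by simpa using hyx))
              · omega
        rw [this]
        show s + 1 + (((PySem.List.index? r m).getD 0 : Nat) : Int)
          = s + (((PySem.List.index? (x :: r) m).getD 0 : Nat) : Int)
        rw [PySem.List.index?_cons_of_ne r (by omega : x ≠ m)]
        rcases Option.isSome_iff_exists.mp ((PySem.List.index?_isSome_iff _ _).mpr hmmem) with ⟨k, hk⟩
        rw [hk]
        simp; omega
    · simp only [pvArgmin, if_neg hx]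
      rw [List.filter_cons_of_neg (by simpa using hx)]
      rw [ih (s+1) mi mv]
      cases hmin : PySem.List.min? (r.filter (fun y => decide (y < mv))) (fun y => y) with
      | none => rfl
      | some m =>
        have hmlt : m < mv := by simpa using List.of_mem_filter (PySem.List.min?_mem hmin)
        show s + 1 + (((PySem.List.index? r m).getD 0 : Nat) : Int)
          = s + (((PySem.List.index? (x :: r) m).getD 0 : Nat) : Int)
        rw [PySem.List.index?_cons_of_ne r (by omega : x ≠ m)]
        rcases Option.isSome_iff_exists.mp
          ((PySem.List.index?_isSome_iff _ _).mpr (List.mem_of_mem_filter (PySem.List.min?_mem hmin))) with ⟨k, hk⟩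
        rw [hk]
        simp; omega

-- A's else-branch equals the first index of the minimum of the whole list
theorem pvArgmin_eq_indexMin (a : Int) (t : List Int) :
    pvArgmin t 1 0 a = ((PySem.List.index? (a :: t) (t.foldl min a)).getD 0 : Int) := by
  rw [pvArgmin_spec]
  have hminA : PySem.List.min? (a :: t) (fun y => y) = some (t.foldl min a) :=
    PySem.List.min?_id_cons a t
  cases hmin : PySem.List.min? (t.filter (fun y => decide (y < a))) (fun y => y) with
  | none =>
    rw [PySem.List.min?_eq_none_iff] at hmin
    have hge : ∀ y ∈ t, a ≤ y := by
      intro y hy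
      by_contra h
      rw [not_le] at h
      have : y ∈ t.filter (fun y => decide (y < a)) :=
        List.mem_filter_of_mem hy (by simpa using h)
      simp [hmin] at this
    have hfa : t.foldl min a = a := by
      have := pvMin?_eq_some (a :: t) a List.mem_cons_self (by
        intro y hy
        rcases List.mem_cons.mp hy with h | h
        · omega
        · exact hge y h)
      rw [hminA] at this
      exact Option.some.inj this
    rw [hfa, PySem.List.index?_cons_self]
    rfl
  | some m =>
    have hmmem := List.mem_of_mem_filter (PySem.List.min?_mem hmin)
    have hmlt : m < a := by simpa using List.of_mem_filter (PySem.List.min?_mem hmin)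
    have hmlb := PySem.List.min?_isMin hmin
    have hfm : t.foldl min a = m := by
      have := pvMin?_eq_some (a :: t) m (List.mem_cons_of_mem _ hmmem) (by
        intro y hy
        rcases List.mem_cons.mp hy with h | h
        · omega
        · by_cases hya : y < a
          · exact hmlb y (List.mem_filter_of_mem h (by simpa using hya))
          · omega)
      rw [hminA] at this
      exact Option.some.inj this
    rw [hfm]
    show (1 : Int) + (((PySem.List.index? t m).getD 0 : Nat) : Int)
      = (((PySem.List.index? (a :: t) m).getD 0 : Nat) : Int)
    rw [PySem.List.index?_cons_of_ne t (by omega : a ≠ m)]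
    rcases Option.isSome_iff_exists.mp ((PySem.List.index?_isSome_iff _ _).mpr hmmem) with ⟨k, hk⟩
    rw [hk]
    simp; omega

theorem pvLast_eq (a : Int) (t : List Int) :
    (PySem.List.pyGet? (a :: t) (-1)).getD 0
      = (PySem.List.pyGet? (a :: t) (((a :: t).length : Int) - 1)).getD 0 := by
  simp [PySem.List.pyGet?, PySem.List.pyIdx?]

-- ===== VERDICT (by name: the statement is the Claim_ definition above) =====
theorem findShift_spec : Claim_equal_findShift := by
  intro A _ hA
  unfold Spec_findShift findShift findShift_alt
  obtain ⟨a, t, rfl⟩ : ∃ a t, A = a :: t := by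
    cases A with
    | nil => exact absurd rfl hA
    | cons a t => exact ⟨a, t, rfl⟩
  simp only [pvLast_eq]
  by_cases hguard : (PySem.List.pyGet? (a :: t) 0).getD 0 < (PySem.List.pyGet? (a :: t) (((a :: t).length : Int) - 1)).getD 0
  · have hg : a < (a :: t)[t.length] := by
      simpa [PySem.List.pyGet?, PySem.List.pyIdx?] using hguard
    simp [hg]
  · simp only [if_neg hguard]
    have hfold :
        ((PySem.List.pyRange 0 ((a :: t).length : Int) 1).foldl
          (fun (st : Int × Int) i =>
            let x := PySem.List.pyGetD (a :: t) i 0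
            if x < st.2 then (i, x) else st)
          (0, PySem.List.pyGetD (a :: t) 0 0)).1
        = pvArgmin (a :: t) 0 0 a := by
      rw [← pvFold_eq_argmin]
      rw [PySem.List.enumerate_eq_map_pyRange (d := 0), List.foldl_map]
      simp [pvStep, PySem.List.pyGetD_ofNat']
    rw [hfold]
    have ha0 : pvArgmin (a :: t) 0 0 a = pvArgmin t 1 0 a := by
      simp [pvArgmin]
    rw [ha0, pvArgmin_eq_indexMin]
    have hFAM := firstArgmin_firstMin (a :: t) (a :: t).length 0 (a :: t).length (by omega) (by simp)
    have hIdx := pvIndexMin_firstMin a t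
    rw [pvFirstMin_unique hIdx hFAM]
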